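-- pv_equiv track=rewrite | github.com/LordBrom/programming-challenges | adventofcode/y2017/day9.py | remove_escaped
-- ===== SOURCE A (Python) =====
-- def remove_escaped(string):
--     result = ""
--
--     i = 0
--     while i < len(string):
--         if string[i] == "!":
--             i += 1
--         else:
--             result += string[i]
--         i += 1
--
--     return result
-- ===== SOURCE B (Python) =====
-- def remove_escaped(string):
--     # Stage 1: split on '!'.  Stage 2: reassemble -- the first segment is kept
--     # whole; each later segment lost its leading '!' delimiter, which escapes
--     # the segment's first char (drop it).  An EMPTY later segment means the
--     # '!' escaped the NEXT '!' delimiter, so the segment after it is kept whole.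
--     segs = string.split('!')
--     parts = [segs[0]]
--     i = 1
--     while i < len(segs):
--         if segs[i]:
--             parts.append(segs[i][1:])
--             i += 1
--         else:
--             i += 2
--             if i - 1 < len(segs):
--                 parts.append(segs[i - 1])
--     return "".join(parts)
-- ===== Notes on version B (the rewrite author's own statement) =====
-- stated objective: faster
-- what changed: Replaced A's char-by-char index-jumping scan (with quadratic string +=) by a staged algorithm: split the string on '!' once, then reassemble by dropping each later segment's first (escaped) char, with an empty segment meaning the '!' escaped the next '!' delimiter so the following segment is kept whole.
import Mathlib
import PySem

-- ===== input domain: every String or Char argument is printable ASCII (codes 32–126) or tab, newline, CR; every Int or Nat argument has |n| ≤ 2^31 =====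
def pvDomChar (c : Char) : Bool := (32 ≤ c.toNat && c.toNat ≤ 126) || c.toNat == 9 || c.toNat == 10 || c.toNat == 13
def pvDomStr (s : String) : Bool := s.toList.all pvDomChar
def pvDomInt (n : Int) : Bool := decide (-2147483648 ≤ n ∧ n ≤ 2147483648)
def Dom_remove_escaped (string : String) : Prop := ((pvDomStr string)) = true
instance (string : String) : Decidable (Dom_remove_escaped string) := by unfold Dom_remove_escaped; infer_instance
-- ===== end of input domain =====

-- B replaces A's index-jumping char scan by a split-on-'!' pass followed by a segment
-- reassembly pass (alternative decomposition; return value identical).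

-- ===== PORT A =====
-- A walks an index i over the string; on '!' it advances i an extra step (skipping the
-- next char) and otherwise appends string[i].  We transliterate the while loop as
-- recursion over the remaining characters: on '!' the next character is dropped
-- (rest.drop 1 = the double i += 1), otherwise the char is appended to the accumulator.
def pvAGo (acc : List Char) : List Char → List Char
  | [] => acc
  | c :: rest =>
    if c = '!' then pvAGo acc (rest.drop 1)
    else pvAGo (acc ++ [c]) rest
termination_by l => l.length
decreasing_by
  all_goals simp

def remove_escaped (string : String) : String := String.ofList (pvAGo [] string.toList)

-- ===== PORT B =====
-- Hand port of Python's str.split('!') for the single-character separator '!': exact --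
-- every occurrence of '!' ends a segment, an empty string yields [""], adjacent or
-- trailing separators yield empty segments, just as in CPython.
def pvSplitBang : List Char → List (List Char)
  | [] => [[]]
  | c :: r =>
    if c = '!' then [] :: pvSplitBang r
    else
      match pvSplitBang r with
      | [] => [[c]]          -- unreachable: pvSplitBang never returns []
      | s :: ss => (c :: s) :: ss

-- Source B's while loop over the later segments: a nonempty segment loses its first
-- (escaped) char; an empty segment means the '!' escaped the next '!' delimiter,
-- so the segment after it is appended whole (i += 2).
def pvProcSegs : List (List Char) → List Char
  | [] => []
  | (_ :: segtail) :: rest => segtail ++ pvProcSegs rest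
  | [] :: rest =>
    match rest with
    | [] => []
    | nxt :: rest' => nxt ++ pvProcSegs rest'

def remove_escaped_alt (string : String) : String :=
  match pvSplitBang string.toList with
  | [] => String.ofList []   -- unreachable: pvSplitBang never returns []
  | s0 :: rest => String.ofList (s0 ++ pvProcSegs rest)

-- ===== PRECONDITION & SPEC =====
def Spec_remove_escaped (string : String) (out : String) : Prop := out = remove_escaped_alt string
instance (string : String) (out : String) : Decidable (Spec_remove_escaped string out) := by unfold Spec_remove_escaped; infer_instance

-- ===== CLAIM (what is proved, stated in full; the proofs are below) =====
def Claim_equal_remove_escaped : Prop := ∀ (string : String), Dom_remove_escaped string → Spec_remove_escaped string (remove_escaped string)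

-- ===== LEMMAS AND PROOFS =====
def pvCombine : List (List Char) → List Char
  | [] => []
  | s0 :: rest => s0 ++ pvProcSegs rest

theorem pvSplitBang_ne_nil (l : List Char) : pvSplitBang l ≠ [] := by
  cases l with
  | nil => simp [pvSplitBang]
  | cons c r =>
    by_cases h : c = '!'
    · simp [pvSplitBang, h]
    · simp only [pvSplitBang, h, if_false]
      cases hr : pvSplitBang r <;> simp

theorem pvAGo_eq_combine : ∀ (l acc : List Char),
    pvAGo acc l = acc ++ pvCombine (pvSplitBang l)
  | [], acc => by simp [pvAGo, pvSplitBang, pvCombine, pvProcSegs]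
  | c :: rest, acc => by
    by_cases h : c = '!'
    · subst h
      cases rest with
      | nil => simp [pvAGo, pvSplitBang, pvCombine, pvProcSegs]
      | cons d rest' =>
        have ih := pvAGo_eq_combine rest' acc
        by_cases hd : d = '!'
        · subst hd
          obtain ⟨s, ss, hs⟩ : ∃ s ss, pvSplitBang rest' = s :: ss := by
            cases hr : pvSplitBang rest' with
            | nil => exact absurd hr (pvSplitBang_ne_nil rest')
            | cons s ss => exact ⟨s, ss, rfl⟩
          simp only [pvAGo, List.drop_succ_cons, List.drop_zero]
          rw [ih]
          simp [pvSplitBang, hs, pvCombine, pvProcSegs]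
        · obtain ⟨s, ss, hs⟩ : ∃ s ss, pvSplitBang rest' = s :: ss := by
            cases hr : pvSplitBang rest' with
            | nil => exact absurd hr (pvSplitBang_ne_nil rest')
            | cons s ss => exact ⟨s, ss, rfl⟩
          simp only [pvAGo, List.drop_succ_cons, List.drop_zero]
          rw [ih]
          simp [pvSplitBang, hd, hs, pvCombine, pvProcSegs]
    · obtain ⟨s, ss, hs⟩ : ∃ s ss, pvSplitBang rest = s :: ss := by
        cases hr : pvSplitBang rest with
        | nil => exact absurd hr (pvSplitBang_ne_nil rest)
        | cons s ss => exact ⟨s, ss, rfl⟩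
      have ih := pvAGo_eq_combine rest (acc ++ [c])
      rw [pvAGo, if_neg h, ih]
      simp [pvSplitBang, h, hs, pvCombine]
termination_by l _ => l.length

-- ===== VERDICT (by name: the statement is the Claim_ definition above) =====
theorem remove_escaped_spec : Claim_equal_remove_escaped := by
  intro s _
  unfold Spec_remove_escaped remove_escaped remove_escaped_alt
  rw [pvAGo_eq_combine]
  obtain ⟨s0, rest, hs⟩ : ∃ s0 rest, pvSplitBang s.toList = s0 :: rest := by
    cases hr : pvSplitBang s.toList with
    | nil => exact absurd hr (pvSplitBang_ne_nil s.toList)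
    | cons s0 rest => exact ⟨s0, rest, rfl⟩
  simp [hs, pvCombine]
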